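-- pv_equiv track=rewrite | github.com/YooKyungHun/Algorithm | ALGORITHM/PCCP모의고사1회1번.py | solution
-- ===== SOURCE A (Python) =====
-- from collections import deque, Counter
--
-- def solution(input_string):
--     tmp = []
--
--     # 거꾸로
--     reversed_input_string = input_string[::-1]
--
--     cnt = Counter(input_string)
--     # Counter({'a': 3, 'e': 2, 'd': 2, 'b': 2, 'c': 2})
--
--     for key in cnt.keys():
--         if cnt[key] >= 2:
--             key_first_index = input_string.index(key)
--             key_last_index = input_string.rindex(key)
--             # key_last_index = (len(input_string) - 1) - reversed_input_string.index(key)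
--
--             if key_first_index + cnt[key] - 1 < key_last_index:
--                 tmp.append(key)
--             # 0   5
--             # e ? e => e 는 4개 (cnt['e'] = 4)
--             # => first_index 에 key 의 개수를 더했는데도(first_index 포함하므로 1 뺌)
--             # => last_index 가 더 크다면 중간에 다른 문자가 껴있는 것
--
--     if len(tmp) == 0:
--         return "N"
--     else:
--         tmp.sort()
--         return ''.join(tmp)
-- ===== SOURCE B (Python) =====
-- from collections import Counter
--
-- def solution(input_string):
--     # A character qualifies exactly when its occurrences are split across more
--     # than one maximal run of equal characters: collapse consecutive duplicates
--     # and keep the characters that appear at least twice in the collapsed list.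
--     runs = []
--     prev = None
--     for ch in input_string:
--         if ch != prev:
--             runs.append(ch)
--         prev = ch
--     counts = Counter(runs)
--     res = ''.join(sorted(ch for ch in counts if counts[ch] >= 2))
--     return res if res else "N"
-- ===== Notes on version B (the rewrite author's own statement) =====
-- stated objective: alternative
-- what changed: Replaces A's Counter plus per-key index()/rindex() whole-string rescans and index arithmetic with a run-length view: collapse consecutive duplicate characters in one pass and keep the characters occurring at least twice in the collapsed list (i.e. starting more than one maximal run), then sort; O(n + k log k) vs A's O(n*k), though not measurably faster in CPython since A's per-key scans are C-implemented.
import Mathlib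
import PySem

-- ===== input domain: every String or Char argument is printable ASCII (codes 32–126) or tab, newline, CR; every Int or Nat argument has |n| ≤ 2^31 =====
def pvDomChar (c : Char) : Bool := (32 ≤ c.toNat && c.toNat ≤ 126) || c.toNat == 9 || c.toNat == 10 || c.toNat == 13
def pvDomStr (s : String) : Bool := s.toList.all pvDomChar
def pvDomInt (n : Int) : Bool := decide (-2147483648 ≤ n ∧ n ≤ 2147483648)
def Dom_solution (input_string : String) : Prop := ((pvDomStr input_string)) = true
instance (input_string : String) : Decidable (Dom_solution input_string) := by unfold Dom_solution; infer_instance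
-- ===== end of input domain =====

-- B replaces A's Counter + per-key index()/rindex() index arithmetic by a run-length view:
-- collapse consecutive duplicate characters and keep the characters that start at least
-- two maximal runs (alternative algorithm; same return value).

-- ===== PORT A =====
-- port of input_string.rindex(key): scan from the right; exact since A only calls it on keys of Counter(input_string), which occur in the string
def pyRindexChar (cs : List Char) (c : Char) : Int :=
  ((cs.length : Int) - 1) - (cs.reverse.idxOf c : Int)

def solution (input_string : String) : String :=
  let cs := input_string.toList
  let _reversed_input_string := PySem.List.slice? cs none none (-1)   -- computed and unused, as in A
  let cnt : PySem.Dict Char Int := PySem.Dict.counter cs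
  let tmp : List Char := cnt.keys.foldl (fun tmp key =>
    if 2 ≤ cnt.getD key 0 then
      -- input_string.index(key): first index; exact since key ∈ cs
      if (cs.idxOf key : Int) + cnt.getD key 0 - 1 < pyRindexChar cs key then tmp ++ [key] else tmp
    else tmp) []
  if tmp.length = 0 then "N"
  else String.ofList (PySem.List.sorted tmp (fun x => x) false)   -- tmp.sort(); ''.join(tmp)

-- ===== PORT B =====
def solution_alt (input_string : String) : String :=
  let cs := input_string.toList
  -- for ch in input_string: if ch != prev: runs.append(ch); prev = ch
  let st := cs.foldl (fun (st : List Char × Option Char) ch =>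
      (if some ch ≠ st.2 then st.1 ++ [ch] else st.1, some ch)) ([], none)
  let runs := st.1
  let counts : PySem.Dict Char Int := PySem.Dict.counter runs
  -- ''.join(sorted(ch for ch in counts if counts[ch] >= 2))
  let res := String.ofList (PySem.List.sorted
      (counts.keys.filter (fun ch => decide (2 ≤ counts.getD ch 0))) (fun x => x) false)
  if res = "" then "N" else res

-- ===== PRECONDITION & SPEC =====
def Spec_solution (input_string : String) (out : String) : Prop := out = solution_alt input_string
instance (input_string : String) (out : String) : Decidable (Spec_solution input_string out) := by unfold Spec_solution; infer_instance

-- ===== CLAIM (what is proved, stated in full; the proofs are below) =====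
def Claim_equal_solution : Prop := ∀ (input_string : String), Dom_solution input_string → Spec_solution input_string (solution input_string)

-- ===== LEMMAS AND PROOFS =====

-- first index of c in cs, as an Int (meaningful when c ∈ cs)
def pvFIdx (cs : List Char) (c : Char) : Int := (cs.idxOf c : Int)

-- B's loop, with the previous character as explicit state
def pvClp : Option Char → List Char → List Char
  | _, [] => []
  | p, y :: ys => if some y ≠ p then y :: pvClp (some y) ys else pvClp (some y) ys

-- the same collapse, in head-pair form (for the inductive lemmas)
def pvClp2 : List Char → List Char
  | [] => []
  | [x] => [x]
  | x :: y :: ys => if y = x then pvClp2 (y :: ys) else x :: pvClp2 (y :: ys)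

lemma pvFoldl_clp (cs : List Char) : ∀ (acc : List Char) (p : Option Char),
    (cs.foldl (fun (st : List Char × Option Char) ch =>
      (if some ch ≠ st.2 then st.1 ++ [ch] else st.1, some ch)) (acc, p)).1
    = acc ++ pvClp p cs := by
  induction cs with
  | nil => intro acc p; simp [pvClp]
  | cons y ys ih =>
    intro acc p
    rw [List.foldl_cons]
    show (List.foldl (fun (st : List Char × Option Char) ch =>
        (if some ch ≠ st.2 then st.1 ++ [ch] else st.1, some ch))
        (if some y ≠ p then acc ++ [y] else acc, some y) ys).1 = acc ++ pvClp p (y :: ys)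
    rw [show pvClp p (y :: ys) = if some y ≠ p then y :: pvClp (some y) ys
          else pvClp (some y) ys from rfl]
    by_cases h : some y = p
    · rw [if_neg (fun hne => hne h), if_neg (fun hne => hne h), ih acc (some y)]
    · rw [if_pos h, if_pos h, ih (acc ++ [y]) (some y), List.append_assoc]
      rfl

lemma pvClp_cons (cs : List Char) : ∀ (x : Char), x :: pvClp (some x) cs = pvClp2 (x :: cs) := by
  induction cs with
  | nil => intro x; rfl
  | cons y ys ih =>
    intro x
    rw [show pvClp (some x) (y :: ys) = if some y ≠ some x then y :: pvClp (some y) ys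
          else pvClp (some y) ys from rfl]
    by_cases h : y = x
    · subst h
      rw [if_neg (fun hne => hne rfl)]
      rw [show pvClp2 (y :: y :: ys) = if y = y then pvClp2 (y :: ys)
            else y :: pvClp2 (y :: ys) from rfl, if_pos rfl]
      exact ih y
    · rw [if_pos (fun he => h (Option.some.inj he))]
      rw [show pvClp2 (x :: y :: ys) = if y = x then pvClp2 (y :: ys)
            else x :: pvClp2 (y :: ys) from rfl, if_neg h]
      rw [ih y]

lemma pvClp_none (cs : List Char) : pvClp none cs = pvClp2 cs := by
  cases cs with
  | nil => rfl
  | cons x xs =>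
    rw [show pvClp none (x :: xs) = if some x ≠ none then x :: pvClp (some x) xs
          else pvClp (some x) xs from rfl, if_pos (by simp)]
    exact pvClp_cons xs x

lemma pvMem_clp2 (cs : List Char) : ∀ c, c ∈ pvClp2 cs ↔ c ∈ cs := by
  induction cs with
  | nil => intro c; simp [pvClp2]
  | cons x t ih =>
    intro c
    cases t with
    | nil => simp [pvClp2]
    | cons y ys =>
      by_cases h : y = x
      · subst h
        rw [show pvClp2 (y :: y :: ys) = if y = y then pvClp2 (y :: ys)
              else y :: pvClp2 (y :: ys) from rfl, if_pos rfl, ih c]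
        simp only [List.mem_cons]
        tauto
      · rw [show pvClp2 (x :: y :: ys) = if y = x then pvClp2 (y :: ys)
              else x :: pvClp2 (y :: ys) from rfl, if_neg h, List.mem_cons, ih c]
        simp [List.mem_cons]

lemma pvNotMem_count0 (cs : List Char) (c : Char) (h : c ∉ cs) : (pvClp2 cs).count c = 0 :=
  List.count_eq_zero.mpr (fun hc => h ((pvMem_clp2 cs c).mp hc))

lemma pvRindex_cons (x : Char) (cs : List Char) (c : Char) (h : c ∈ cs) :
    pyRindexChar (x :: cs) c = 1 + pyRindexChar cs c := by
  unfold pyRindexChar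
  rw [List.reverse_cons, List.idxOf_append_of_mem (List.mem_reverse.mpr h), List.length_cons]
  push_cast; ring

lemma pvRindex_cons_self (x : Char) (cs : List Char) (h : x ∉ cs) :
    pyRindexChar (x :: cs) x = 0 := by
  unfold pyRindexChar
  rw [List.reverse_cons, List.idxOf_append_of_notMem (fun hc => h (List.mem_reverse.mp hc))]
  simp

lemma pvFIdx_cons (x : Char) (cs : List Char) (c : Char) :
    pvFIdx (x :: cs) c = if c = x then 0 else pvFIdx cs c + 1 := by
  unfold pvFIdx
  by_cases h : c = x
  · simp [h, List.idxOf_cons_self]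
  · rw [List.idxOf_cons_ne _ (fun he => h he.symm)]
    simp [h]

-- the heart: for a present character, #runs ≥ 1, last ≥ first + count - 1,
-- and the occurrences are one contiguous block (#runs = 1) iff equality holds
lemma pvMain (cs : List Char) : ∀ c, c ∈ cs →
    1 ≤ (pvClp2 cs).count c ∧
    pvFIdx cs c + (cs.count c : Int) - 1 ≤ pyRindexChar cs c ∧
    ((pvClp2 cs).count c = 1 ↔ pyRindexChar cs c = pvFIdx cs c + (cs.count c : Int) - 1) := by
  induction cs with
  | nil => intro c hc; simp at hc
  | cons x t ih =>
    intro c hc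
    cases t with
    | nil =>
      have hcx : c = x := by simpa using hc
      subst hcx
      refine ⟨by simp [pvClp2], ?_, ?_⟩ <;>
        simp [pvClp2, pyRindexChar, pvFIdx, List.idxOf_cons_self]
    | cons y ys =>
      by_cases hyx : y = x
      · -- leading duplicate: collapse ignores x, indices shift
        subst hyx
        have h2 : pvClp2 (y :: y :: ys) = pvClp2 (y :: ys) := by rw [pvClp2, if_pos rfl]
        by_cases hcx : c = y
        · subst hcx
          have hct : c ∈ c :: ys := List.mem_cons_self
          obtain ⟨h1, hle, hiff⟩ := ih c hct
          have hr : pyRindexChar (c :: c :: ys) c = 1 + pyRindexChar (c :: ys) c :=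
            pvRindex_cons c (c :: ys) c hct
          have hf : pvFIdx (c :: c :: ys) c = 0 := by rw [pvFIdx_cons, if_pos rfl]
          have hf2 : pvFIdx (c :: ys) c = 0 := by rw [pvFIdx_cons, if_pos rfl]
          have hcnt : (c :: c :: ys).count c = (c :: ys).count c + 1 := by
            rw [List.count_cons_self]
          refine ⟨by rw [h2]; exact h1, ?_, ?_⟩
          · rw [hr, hf, hcnt]; rw [hf2] at hle; push_cast at hle ⊢; omega
          · rw [h2, hiff, hr, hf, hcnt]; rw [hf2] at *; push_cast; constructor <;> intro h <;> omega
        · have hct : c ∈ y :: ys := by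
            rcases List.mem_cons.mp hc with h | h
            · exact absurd h hcx
            · exact h
          obtain ⟨h1, hle, hiff⟩ := ih c hct
          have hr : pyRindexChar (y :: y :: ys) c = 1 + pyRindexChar (y :: ys) c :=
            pvRindex_cons y (y :: ys) c hct
          have hf : pvFIdx (y :: y :: ys) c = pvFIdx (y :: ys) c + 1 := by
            rw [pvFIdx_cons, if_neg hcx]
          have hcnt : (y :: y :: ys).count c = (y :: ys).count c := by
            rw [List.count_cons, if_neg (by simpa using fun h : y = c => hcx h.symm)]
            simp
          refine ⟨by rw [h2]; exact h1, ?_, ?_⟩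
          · rw [hr, hf, hcnt]; omega
          · rw [h2, hiff, hr, hf, hcnt]; constructor <;> intro h <;> omega
      · -- x starts a run of its own
        have h2 : pvClp2 (x :: y :: ys) = x :: pvClp2 (y :: ys) := by rw [pvClp2, if_neg hyx]
        by_cases hcx : c = x
        · subst hcx
          have hf : pvFIdx (c :: y :: ys) c = 0 := by rw [pvFIdx_cons, if_pos rfl]
          by_cases hct : c ∈ y :: ys
          · -- c occurs again later: at least two runs, strict gap
            obtain ⟨h1, hle, _⟩ := ih c hct
            have hr : pyRindexChar (c :: y :: ys) c = 1 + pyRindexChar (y :: ys) c :=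
              pvRindex_cons c (y :: ys) c hct
            have hcnt : (c :: y :: ys).count c = (y :: ys).count c + 1 := by
              rw [List.count_cons_self]
            have hR : (pvClp2 (c :: y :: ys)).count c = (pvClp2 (y :: ys)).count c + 1 := by
              rw [h2, List.count_cons_self]
            have hf1 : 1 ≤ pvFIdx (y :: ys) c := by
              rw [pvFIdx_cons, if_neg (fun h => hyx h.symm)]
              unfold pvFIdx; omega
            refine ⟨by omega, ?_, ?_⟩
            · rw [hr, hf, hcnt]; push_cast; omega
            · rw [hR, hr, hf, hcnt]
              constructor <;> intro h
              · omega
              · exfalso; push_cast at h hle; omega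
          · -- single run of c at the front
            have hr : pyRindexChar (c :: y :: ys) c = 0 := pvRindex_cons_self c (y :: ys) hct
            have hcnt : (c :: y :: ys).count c = 1 := by
              rw [List.count_cons_self, List.count_eq_zero.mpr hct]
            have hR : (pvClp2 (c :: y :: ys)).count c = 1 := by
              rw [h2, List.count_cons_self, pvNotMem_count0 _ _ hct]
            refine ⟨by omega, ?_, ?_⟩
            · rw [hr, hf, hcnt]; norm_num
            · rw [hR, hr, hf, hcnt]; norm_num
        · have hct : c ∈ y :: ys := by
            rcases List.mem_cons.mp hc with h | h
            · exact absurd h hcx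
            · exact h
          obtain ⟨h1, hle, hiff⟩ := ih c hct
          have hr : pyRindexChar (x :: y :: ys) c = 1 + pyRindexChar (y :: ys) c :=
            pvRindex_cons x (y :: ys) c hct
          have hf : pvFIdx (x :: y :: ys) c = pvFIdx (y :: ys) c + 1 := by
            rw [pvFIdx_cons, if_neg hcx]
          have hcnt : (x :: y :: ys).count c = (y :: ys).count c := by
            rw [List.count_cons, if_neg (by simpa using fun h : x = c => hcx h.symm)]
            simp
          have hR : (pvClp2 (x :: y :: ys)).count c = (pvClp2 (y :: ys)).count c := by
            rw [h2, List.count_cons, if_neg (by simpa using fun h : x = c => hcx h.symm)]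
            simp
          refine ⟨by omega, ?_, ?_⟩
          · rw [hr, hf, hcnt]; omega
          · rw [hR, hiff, hr, hf, hcnt]; constructor <;> intro h <;> omega

-- the two selection criteria agree on every character of the string
lemma pvCrit (cs : List Char) (c : Char) (hc : c ∈ cs) :
    (2 ≤ ((pvClp2 cs).count c : Int)) ↔
    pvFIdx cs c + (cs.count c : Int) - 1 < pyRindexChar cs c := by
  obtain ⟨h1, hle, hiff⟩ := pvMain cs c hc
  constructor
  · intro h
    rcases lt_or_eq_of_le hle with h' | h'
    · exact h'
    · exfalso
      have : (pvClp2 cs).count c = 1 := hiff.mpr h'.symm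
      omega
  · intro h
    have : ¬ (pvClp2 cs).count c = 1 := fun he => by
      have := hiff.mp he; omega
    omega

lemma pvCount_one_idx (cs : List Char) (c : Char) (h : c ∈ cs) (h1 : cs.count c = 1) :
    pvFIdx cs c = pyRindexChar cs c := by
  induction cs with
  | nil => simp at h
  | cons x cs ih =>
    by_cases hx : c = x
    · subst hx
      have hnot : c ∉ cs := by
        rw [List.count_cons] at h1; simp at h1
        exact List.count_eq_zero.mp (by omega)
      rw [pvRindex_cons_self _ _ hnot, pvFIdx_cons]; simp
    · have hm : c ∈ cs := by rcases List.mem_cons.mp h with h' | h'; exact absurd h' hx; exact h'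
      have hc : cs.count c = 1 := by
        have hxb : (x == c) = false := beq_eq_false_iff_ne.mpr (fun he => hx he.symm)
        rw [List.count_cons, hxb] at h1; simpa using h1
      rw [pvFIdx_cons, if_neg hx, pvRindex_cons _ _ _ hm, ih hm hc]; ring

-- A's accumulation loop is a filter of the distinct characters
lemma pvA_list (cs : List Char) :
    ((PySem.Dict.counter cs : PySem.Dict Char Int).keys.foldl (fun tmp key =>
       if 2 ≤ (PySem.Dict.counter cs : PySem.Dict Char Int).getD key 0 then
         if (cs.idxOf key : Int) + (PySem.Dict.counter cs : PySem.Dict Char Int).getD key 0 - 1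
             < pyRindexChar cs key then tmp ++ [key] else tmp
       else tmp) []) =
    (PySem.Set.ofList cs).filter
      (fun key => decide (pvFIdx cs key + (cs.count key : Int) - 1 < pyRindexChar cs key)) := by
  rw [PySem.Dict.keys_counter]
  rw [PySem.List.foldl_congr_mem (PySem.Set.ofList cs)
        _ (fun tmp key => if pvFIdx cs key + (cs.count key : Int) - 1 < pyRindexChar cs key
              then tmp ++ [key] else tmp) []
        (by
          intro acc key hk
          have hmem : key ∈ cs := by simpa [pysem] using hk
          rw [PySem.Dict.getD_counter cs key]
          have hpos : 1 ≤ cs.count key := List.count_pos_iff.mpr hmem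
          by_cases h2 : 2 ≤ cs.count key
          · rw [if_pos (by exact_mod_cast h2)]; rfl
          · have h1 : cs.count key = 1 := by omega
            have hcond : ¬ (pvFIdx cs key + ((cs.count key : Nat) : Int) - 1
                < pyRindexChar cs key) := by
              rw [pvCount_one_idx cs key hmem h1, h1]; push_cast; omega
            rw [if_neg (by exact_mod_cast h2)]
            exact (if_neg hcond).symm)]
  rw [PySem.List.foldl_append_ite_eq_filter
        (fun key => pvFIdx cs key + (cs.count key : Int) - 1 < pyRindexChar cs key)
        (PySem.Set.ofList cs) []]
  rw [List.nil_append]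

-- B's filter over Counter(runs) is a filter of the distinct run heads
lemma pvB_list (rs : List Char) :
    (PySem.Dict.counter rs : PySem.Dict Char Int).keys.filter
      (fun ch => decide (2 ≤ (PySem.Dict.counter rs : PySem.Dict Char Int).getD ch 0)) =
    (PySem.Set.ofList rs).filter (fun ch => decide (2 ≤ (rs.count ch : Int))) := by
  rw [PySem.Dict.keys_counter]
  exact List.filter_congr (fun ch _ => by rw [PySem.Dict.getD_counter])

-- the two filtered lists are permutations of one another
lemma pvPerm (cs : List Char) :
    ((PySem.Set.ofList (pvClp2 cs)).filter
        (fun ch => decide (2 ≤ ((pvClp2 cs).count ch : Int)))).Perm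
    ((PySem.Set.ofList cs).filter
        (fun key => decide (pvFIdx cs key + (cs.count key : Int) - 1 < pyRindexChar cs key))) := by
  rw [List.perm_ext_iff_of_nodup
      ((PySem.Set.nodup_ofList (pvClp2 cs)).filter _)
      ((PySem.Set.nodup_ofList cs).filter _)]
  intro c
  simp only [List.mem_filter, PySem.Set.mem_ofList, decide_eq_true_eq]
  constructor
  · rintro ⟨hm, h2⟩
    have hc : c ∈ cs := (pvMem_clp2 cs c).mp hm
    exact ⟨hc, (pvCrit cs c hc).mp h2⟩
  · rintro ⟨hc, h⟩
    exact ⟨(pvMem_clp2 cs c).mpr hc, (pvCrit cs c hc).mpr h⟩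

lemma pvOfList_eq_empty (l : List Char) : String.ofList l = "" ↔ l = [] := by
  constructor
  · intro h
    have := congrArg String.toList h
    simpa using this
  · intro h; simp [h]

-- ===== VERDICT (by name: the statement is the Claim_ definition above) =====
theorem solution_spec : Claim_equal_solution := by
  intro s _
  show solution s = solution_alt s
  simp only [solution, solution_alt]
  rw [pvFoldl_clp s.toList [] none, List.nil_append, pvClp_none]
  rw [pvA_list s.toList, pvB_list (pvClp2 s.toList)]
  rw [PySem.List.sorted_eq_sorted_of_perm _ _ _ (fun a b h => h) (pvPerm s.toList)]
  generalize hL : ((PySem.Set.ofList s.toList).filter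
      (fun key => decide (pvFIdx s.toList key + (s.toList.count key : Int) - 1
        < pyRindexChar s.toList key))) = L
  by_cases hnil : L = []
  · subst hnil
    rw [if_pos (by rfl)]
    rw [if_pos (by rw [pvOfList_eq_empty, PySem.List.sorted_eq_nil_iff]), ]
  · rw [if_neg (by simpa using hnil)]
    rw [if_neg (by rw [pvOfList_eq_empty, PySem.List.sorted_eq_nil_iff]; exact hnil)]
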